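-- pv_equiv track=rewrite | github.com/decembersnow1234/git_repo_sufficiency_policy | enhanced/code/policy_pipeline.py | _extract_common_elements
-- ===== SOURCE A (Python) =====
-- from typing import Dict, List, Tuple, Optional, Union
--
-- def _extract_common_elements(list_of_lists: List[List]) -> List:
--     """Extract common elements that appear in multiple lists"""
--     if not list_of_lists:
--         return []
--
--     # Flatten and count occurrences
--     all_elements = []
--     for sublist in list_of_lists:
--         all_elements.extend(sublist)
--
--     # Count occurrences
--     element_counts = {}
--     for element in all_elements:
--         if element in element_counts:
--             element_counts[element] += 1
--         else:
--             element_counts[element] = 1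
--
--     # Return elements that appear more than once, sorted by frequency
--     threshold = max(2, len(list_of_lists) // 5)  # Appear in at least 20% of policies
--     common = [(elem, count) for elem, count in element_counts.items() if count >= threshold]
--     common.sort(key=lambda x: x[1], reverse=True)
--
--     return [elem for elem, _ in common[:5]]  # Return top 5 common elements
-- ===== SOURCE B (Python) =====
-- from typing import Dict, List, Tuple, Optional, Union
--
-- def _extract_common_elements(list_of_lists: List[List]) -> List:
--     """Extract common elements that appear in multiple lists (bucket sort by frequency)."""
--     if not list_of_lists:
--         return []
--
--     # Count occurrences directly, sublist by sublist (insertion order preserved)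
--     counts = {}
--     for sublist in list_of_lists:
--         for element in sublist:
--             counts[element] = counts.get(element, 0) + 1
--
--     threshold = max(2, len(list_of_lists) // 5)
--
--     # Bucket the qualifying elements by their count, tracking the max count seen
--     buckets = {}
--     maxc = 0
--     for element, count in counts.items():
--         if count >= threshold:
--             if count not in buckets:
--                 buckets[count] = []
--             buckets[count].append(element)
--             if count > maxc:
--                 maxc = count
--
--     # Emit buckets from the highest count down to the threshold
--     result = []
--     for c in range(maxc, threshold - 1, -1):
--         result.extend(buckets.get(c, []))
--     return result[:5]
-- ===== Notes on version B (the rewrite author's own statement) =====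
-- stated objective: alternative
-- what changed: Replaces the comparison sort of (element, count) pairs by a counting/bucket sort: qualifying elements are grouped into per-count buckets in one dict pass and emitted from the maximum count down to the threshold, reproducing the stable order; counting is also done per sublist instead of flattening first.
import Mathlib
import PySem

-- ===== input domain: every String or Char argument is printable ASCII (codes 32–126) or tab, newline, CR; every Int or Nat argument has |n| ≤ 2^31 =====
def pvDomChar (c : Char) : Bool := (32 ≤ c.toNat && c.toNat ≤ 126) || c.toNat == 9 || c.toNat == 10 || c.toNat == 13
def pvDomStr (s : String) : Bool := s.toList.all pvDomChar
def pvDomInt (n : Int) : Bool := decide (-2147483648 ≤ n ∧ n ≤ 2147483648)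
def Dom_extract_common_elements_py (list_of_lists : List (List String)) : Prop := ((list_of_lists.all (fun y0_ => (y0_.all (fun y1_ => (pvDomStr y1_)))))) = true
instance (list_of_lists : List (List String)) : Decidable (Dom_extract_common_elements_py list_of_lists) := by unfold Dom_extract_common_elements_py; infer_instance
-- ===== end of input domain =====

-- B replaces A's comparison sort of (element, count) pairs by a counting/bucket pass over the
-- frequency range (alternative algorithm, same return value).

-- ===== PORT A =====
def extract_common_elements_py (list_of_lists : List (List String)) : List String :=
  if list_of_lists = [] then []
  else
    let all_elements := list_of_lists.foldl (fun acc sublist => acc ++ sublist) []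
    let element_counts := all_elements.foldl
      (fun d element =>
        if d.contains element then d.insert element (d.getD element 0 + 1)
        else d.insert element 1)
      (PySem.Dict.empty : PySem.Dict String Int)
    let threshold := max 2 (PySem.Int.floordiv (list_of_lists.length : Int) 5)
    let common := element_counts.items.filter (fun p => p.2 ≥ threshold)
    let commonSorted := PySem.List.sorted common (fun p => p.2) true
    (PySem.List.slice commonSorted none (some 5)).map (fun p => p.1)

-- ===== PORT B =====
-- loop body of B's bucket-building pass (buckets dict, running max count)
def pvBStep (threshold : Int) (bm : PySem.Dict Int (List String) × Int) (p : String × Int) :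
    PySem.Dict Int (List String) × Int :=
  if p.2 ≥ threshold then
    let b0 := if bm.1.contains p.2 then bm.1 else bm.1.insert p.2 []
    (b0.insert p.2 (b0.getD p.2 [] ++ [p.1]), if p.2 > bm.2 then p.2 else bm.2)
  else bm

def extract_common_elements_py_alt (list_of_lists : List (List String)) : List String :=
  if list_of_lists = [] then []
  else
    let counts := list_of_lists.foldl
      (fun d sublist => sublist.foldl (fun d element => d.insert element (d.getD element 0 + 1)) d)
      (PySem.Dict.empty : PySem.Dict String Int)
    let threshold := max 2 (PySem.Int.floordiv (list_of_lists.length : Int) 5)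
    let bm := counts.items.foldl (pvBStep threshold) (PySem.Dict.empty, 0)
    let result := (PySem.List.pyRange bm.2 (threshold - 1) (-1)).foldl
      (fun r c => r ++ bm.1.getD c []) []
    PySem.List.slice result none (some 5)

-- ===== PRECONDITION & SPEC =====
def Spec_extract_common_elements_py (list_of_lists : List (List String)) (out : List String) : Prop := out = extract_common_elements_py_alt list_of_lists
instance (list_of_lists : List (List String)) (out : List String) : Decidable (Spec_extract_common_elements_py list_of_lists out) := by unfold Spec_extract_common_elements_py; infer_instance

-- ===== CLAIM (what is proved, stated in full; the proofs are below) =====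
def Claim_equal_extract_common_elements_py : Prop := ∀ (list_of_lists : List (List String)), Dom_extract_common_elements_py list_of_lists → Spec_extract_common_elements_py list_of_lists (extract_common_elements_py list_of_lists)

-- ===== LEMMAS AND PROOFS =====

-- a dict lookup falls back to the default exactly when the key is absent
theorem pv_getD_of_not_contains {κ ν : Type} [BEq κ] (d : PySem.Dict κ ν) (k : κ) (v0 : ν)
    (h : d.contains k = false) : d.getD k v0 = v0 := by
  have hg : d.get? k = none := by
    simp only [PySem.Dict.contains, List.any_eq_false] at h
    simp only [PySem.Dict.get?, Option.map_eq_none_iff, List.find?_eq_none]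
    exact h
  simp [PySem.Dict.getD, hg]

-- range(a, b, -1) in closed form, with membership and strict descent
theorem pv_pyRange_neg_one (a b : Int) :
    PySem.List.pyRange a b (-1) = (List.range (a-b).toNat).map (fun k : Nat => a - (k:Int)) := by
  simp only [PySem.List.pyRange]
  rw [if_neg (by norm_num), if_neg (by norm_num : ¬ (0:Int) < -1)]
  by_cases h : b < a
  · rw [if_pos h]
    have harith : (a - b + -(-1) - 1) / -(-1) = a - b := by norm_num
    rw [harith]
    exact List.map_congr_left (fun k _ => by ring)
  · rw [if_neg h, show (a-b).toNat = 0 by omega]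
    simp

theorem pv_mem_pyRange_neg_one (a b x : Int) :
    x ∈ PySem.List.pyRange a b (-1) ↔ b < x ∧ x ≤ a := by
  rw [pv_pyRange_neg_one]
  simp only [List.mem_map, List.mem_range]
  constructor
  · rintro ⟨k, hk, rfl⟩; omega
  · intro ⟨h1, h2⟩; exact ⟨(a - x).toNat, by omega, by omega⟩

theorem pv_pairwise_gt_pyRange_neg_one (a b : Int) :
    (PySem.List.pyRange a b (-1)).Pairwise (· > ·) := by
  rw [pv_pyRange_neg_one]
  exact (List.pairwise_lt_range).map _ (fun x y h => by simp only [gt_iff_lt]; omega)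

-- concatenation of the per-count buckets of l, for the counts cs in the given order
def pvBucketsCat (l : List (String × Int)) (cs : List Int) : List (String × Int) :=
  cs.flatMap (fun c => l.filter (fun p => p.2 = c))

theorem pv_bucketsCat_cons (l : List (String × Int)) (c : Int) (cs : List Int) :
    pvBucketsCat l (c :: cs) = l.filter (fun p => p.2 = c) ++ pvBucketsCat l cs := by
  simp [pvBucketsCat]

theorem pv_mem_bucketsCat_snd {y : String × Int} {l : List (String × Int)} {cs : List Int}
    (h : y ∈ pvBucketsCat l cs) : y.2 ∈ cs := by
  simp only [pvBucketsCat, List.mem_flatMap, List.mem_filter] at h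
  obtain ⟨c, hc, _, hy2⟩ := h
  simpa [of_decide_eq_true hy2] using hc

theorem pv_bucketsCat_append_not_mem (l : List (String × Int)) (x : String × Int) (cs : List Int)
    (hx : x.2 ∉ cs) : pvBucketsCat (l ++ [x]) cs = pvBucketsCat l cs := by
  induction cs with
  | nil => rfl
  | cons c cs ih =>
    have hne : ¬ (x.2 = c) := fun hh => hx (by simp [hh])
    have hx' : x.2 ∉ cs := fun hh => hx (by simp [hh])
    rw [pv_bucketsCat_cons, pv_bucketsCat_cons, ih hx', List.filter_append]
    simp [hne]

theorem pv_insertBy_cons (before : String × Int → String × Int → Bool) (x y : String × Int)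
    (ys : List (String × Int)) :
    PySem.List.insertBy before x (y :: ys)
      = if before x y then x :: y :: ys else y :: PySem.List.insertBy before x ys := rfl

theorem pv_insertBy_append_not (before : String × Int → String × Int → Bool) (x : String × Int)
    (u v : List (String × Int)) (hu : ∀ y ∈ u, before x y = false) :
    PySem.List.insertBy before x (u ++ v) = u ++ PySem.List.insertBy before x v := by
  induction u with
  | nil => simp
  | cons y u ih =>
    have hy := hu y (by simp)
    simp only [List.cons_append, pv_insertBy_cons, hy, Bool.false_eq_true, if_false]
    rw [ih (fun z hz => hu z (by simp [hz]))]

theorem pv_insertBy_all_before (before : String × Int → String × Int → Bool) (x : String × Int)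
    (v : List (String × Int)) (hv : ∀ y ∈ v, before x y = true) :
    PySem.List.insertBy before x v = x :: v := by
  cases v with
  | nil => rfl
  | cons y v => simp [pv_insertBy_cons, hv y (by simp)]

-- inserting x into a bucket concatenation appends it at the end of its own bucket
theorem pv_insert_bucketsCat (cs : List Int) (l : List (String × Int)) (x : String × Int)
    (hp : cs.Pairwise (· > ·)) (hx : x.2 ∈ cs) :
    PySem.List.insertBy (fun a b => decide (b.2 < a.2)) x (pvBucketsCat l cs)
      = pvBucketsCat (l ++ [x]) cs := by
  induction cs with
  | nil => simp at hx
  | cons c cs ih =>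
    have hrest : ∀ r ∈ cs, c > r := (List.pairwise_cons.mp hp).1
    rcases List.mem_cons.mp hx with hxc | hxcs
    · -- x's count is the head count c: skip bucket c, land in front of the strictly smaller tail
      have hxnots : x.2 ∉ cs := fun hh => by have := hrest _ hh; omega
      have hu : ∀ y ∈ l.filter (fun p => p.2 = c), (fun a b => decide (b.2 < a.2)) x y = false := by
        intro y hy
        have h2 : y.2 = c := of_decide_eq_true (List.mem_filter.mp hy).2
        simp only [decide_eq_false_iff_not]
        omega
      have hv : ∀ y ∈ pvBucketsCat l cs, (fun a b => decide (b.2 < a.2)) x y = true := by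
        intro y hy
        have h2 := pv_mem_bucketsCat_snd hy
        have := hrest _ h2
        simp only [decide_eq_true_eq]
        omega
      rw [pv_bucketsCat_cons, pv_insertBy_append_not _ _ _ _ hu, pv_insertBy_all_before _ _ _ hv,
        pv_bucketsCat_cons, pv_bucketsCat_append_not_mem l x cs hxnots, List.filter_append]
      simp [hxc]
    · -- x's count is strictly below c: skip bucket c entirely and recurse
      have hcgt : c > x.2 := hrest _ hxcs
      have hu : ∀ y ∈ l.filter (fun p => p.2 = c), (fun a b => decide (b.2 < a.2)) x y = false := by
        intro y hy
        have h2 : y.2 = c := of_decide_eq_true (List.mem_filter.mp hy).2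
        simp only [decide_eq_false_iff_not]
        omega
      have hne : ¬ (x.2 = c) := by omega
      rw [pv_bucketsCat_cons, pv_insertBy_append_not _ _ _ _ hu,
        ih (List.pairwise_cons.mp hp).2 hxcs, pv_bucketsCat_cons, List.filter_append]
      simp [hne]

-- Python's stable descending sort by count IS the bucket concatenation, for any strictly
-- descending count list cs covering every count present
theorem pv_sortedDesc_eq_bucketsCat (l : List (String × Int)) (cs : List Int)
    (hp : cs.Pairwise (· > ·)) (hm : ∀ p ∈ l, p.2 ∈ cs) :
    PySem.List.sorted l (fun p => p.2) true = pvBucketsCat l cs := by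
  induction l using List.reverseRecOn with
  | nil =>
    rw [PySem.List.sorted_rev_eq_foldl_insertBy]
    simp [pvBucketsCat]
  | append_singleton l x ih =>
    rw [PySem.List.sorted_rev_eq_foldl_insertBy, List.foldl_append]
    simp only [List.foldl_cons, List.foldl_nil]
    rw [← PySem.List.sorted_rev_eq_foldl_insertBy]
    rw [ih (fun p hp' => hm p (List.mem_append_left _ hp'))]
    exact pv_insert_bucketsCat cs l x hp (hm x (by simp))

-- one step of B's bucket fold, seen through a lookup
theorem pv_bstep_getD (t : Int) (bm : PySem.Dict Int (List String) × Int) (p : String × Int)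
    (c : Int) :
    (pvBStep t bm p).1.getD c []
      = if p.2 ≥ t ∧ p.2 = c then bm.1.getD c [] ++ [p.1] else bm.1.getD c [] := by
  unfold pvBStep
  by_cases hq : p.2 ≥ t
  · rw [if_pos hq]
    have hb0 : ∀ c', (if bm.1.contains p.2 then bm.1 else bm.1.insert p.2 []).getD c' [] = bm.1.getD c' [] := by
      intro c'
      by_cases hc : bm.1.contains p.2
      · rw [if_pos hc]
      · have hcf : bm.1.contains p.2 = false := by simpa using hc
        rw [if_neg (by simp [hcf]), PySem.Dict.getD_insert]
        split_ifs with h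
        · rw [h, pv_getD_of_not_contains _ _ _ hcf]
        · rfl
    simp only
    rw [PySem.Dict.getD_insert]
    by_cases hc : c = p.2
    · subst hc
      simp [hb0, hq]
    · rw [if_neg hc, if_neg (fun hh : p.2 ≥ t ∧ p.2 = c => hc hh.2.symm)]
      exact hb0 c
  · rw [if_neg hq, if_neg (fun hh : p.2 ≥ t ∧ p.2 = c => hq hh.1)]

-- bucket contents of B's fold: per count c, the qualifying pairs with that count, in order
theorem pv_bfold_getD (t : Int) (its : List (String × Int))
    (bm : PySem.Dict Int (List String) × Int) (c : Int) :
    (its.foldl (pvBStep t) bm).1.getD c []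
      = bm.1.getD c [] ++ (its.filter (fun p => decide (p.2 = c) && decide (p.2 ≥ t))).map (fun p => p.1) := by
  induction its generalizing bm with
  | nil => simp
  | cons p its ih =>
    simp only [List.foldl_cons, List.filter_cons]
    rw [ih, pv_bstep_getD]
    by_cases h1 : p.2 ≥ t <;> by_cases h2 : p.2 = c
    · simp [h2, show t ≤ c by omega]
    · simp [h1, h2]
    · simp [h2, show ¬ t ≤ c by omega]
    · simp [h1, h2]

-- the running max bounds every qualifying count
theorem pv_bfold_max (t : Int) (its : List (String × Int))
    (bm : PySem.Dict Int (List String) × Int) :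
    bm.2 ≤ (its.foldl (pvBStep t) bm).2
      ∧ ∀ p ∈ its, p.2 ≥ t → p.2 ≤ (its.foldl (pvBStep t) bm).2 := by
  induction its generalizing bm with
  | nil => simp
  | cons p its ih =>
    simp only [List.foldl_cons]
    obtain ⟨ihmono, ihall⟩ := ih (pvBStep t bm p)
    have hstep1 : bm.2 ≤ (pvBStep t bm p).2 := by
      unfold pvBStep
      by_cases h : p.2 ≥ t
      · rw [if_pos h]
        show bm.2 ≤ if p.2 > bm.2 then p.2 else bm.2
        split_ifs <;> omega
      · rw [if_neg h]
    have hstep2 : p.2 ≥ t → p.2 ≤ (pvBStep t bm p).2 := by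
      intro h
      unfold pvBStep
      rw [if_pos h]
      show p.2 ≤ if p.2 > bm.2 then p.2 else bm.2
      split_ifs <;> omega
    refine ⟨le_trans hstep1 ihmono, ?_⟩
    intro q hq hqt
    rcases List.mem_cons.mp hq with rfl | hmem
    · exact le_trans (hstep2 hqt) ihmono
    · exact ihall q hmem hqt

-- the two counting loops build the same dict
theorem pv_counts_eq (lls : List (List String)) :
    (lls.foldl (fun acc sublist => acc ++ sublist) []).foldl
        (fun d element =>
          if d.contains element then d.insert element (d.getD element 0 + 1)
          else d.insert element 1)
        (PySem.Dict.empty : PySem.Dict String Int)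
      = lls.foldl
          (fun d sublist => sublist.foldl (fun d element => d.insert element (d.getD element 0 + 1)) d)
          (PySem.Dict.empty : PySem.Dict String Int) := by
  have hstep : (fun (d : PySem.Dict String Int) element =>
        if d.contains element then d.insert element (d.getD element 0 + 1)
        else d.insert element 1)
      = (fun (d : PySem.Dict String Int) element => d.insert element (d.getD element 0 + 1)) := by
    funext d e
    by_cases hc : d.contains e
    · rw [if_pos hc]
    · have hcf : d.contains e = false := by simpa using hc
      rw [if_neg (by simp [hcf]), pv_getD_of_not_contains d e 0 hcf]
      norm_num
  rw [hstep]
  rw [PySem.List.foldl_append_eq_flatMap (fun s => s) lls []]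
  simp only [List.nil_append]
  rw [show List.flatMap (fun s : List String => s) lls = lls.flatten from by
    simpa using (List.flatMap_id (L := lls))]
  exact List.foldl_flatten

-- the whole pipeline downstream of the (shared) counting dict
theorem pv_main (its : List (String × Int)) (t : Int) :
    (PySem.List.slice (PySem.List.sorted (its.filter (fun p => p.2 ≥ t)) (fun p => p.2) true) none (some 5)).map (fun p => p.1)
      = PySem.List.slice
          ((PySem.List.pyRange (its.foldl (pvBStep t) (PySem.Dict.empty, 0)).2 (t - 1) (-1)).foldl
            (fun r c => r ++ (its.foldl (pvBStep t) (PySem.Dict.empty, 0)).1.getD c []) [])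
          none (some 5) := by
  set F := its.foldl (pvBStep t) ((PySem.Dict.empty : PySem.Dict Int (List String)), (0:Int)) with hF
  have hmax := pv_bfold_max t its (PySem.Dict.empty, 0)
  have hpair := pv_pairwise_gt_pyRange_neg_one F.2 (t-1)
  have hmem : ∀ p ∈ its.filter (fun p => p.2 ≥ t), p.2 ∈ PySem.List.pyRange F.2 (t-1) (-1) := by
    intro p hp
    rw [pv_mem_pyRange_neg_one]
    have hmf := List.mem_filter.mp hp
    have hge : p.2 ≥ t := of_decide_eq_true hmf.2
    exact ⟨by omega, hmax.2 p hmf.1 hge⟩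
  rw [pv_sortedDesc_eq_bucketsCat _ _ hpair hmem]
  rw [PySem.List.foldl_append_eq_flatMap (fun c => F.1.getD c []) _ []]
  simp only [List.nil_append]
  rw [PySem.List.slice_to _ (by norm_num : (0:Int) ≤ 5),
      PySem.List.slice_to _ (by norm_num : (0:Int) ≤ 5), List.map_take]
  congr 1
  simp only [pvBucketsCat]
  rw [List.map_flatMap]
  apply List.flatMap_congr
  intro c _
  rw [List.filter_filter, pv_bfold_getD t its (PySem.Dict.empty, 0) c]
  simp

-- ===== VERDICT (by name: the statement is the Claim_ definition above) =====
theorem extract_common_elements_py_spec : Claim_equal_extract_common_elements_py := by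
  intro lls _
  unfold Spec_extract_common_elements_py extract_common_elements_py extract_common_elements_py_alt
  by_cases h : lls = []
  · simp [h]
  · rw [if_neg h, if_neg h]
    simp only
    rw [pv_counts_eq]
    exact pv_main _ _
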